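-- pv_equiv track=rewrite | github.com/Thundercok/VRPTW-Research-Optimization | src/backend/api/routers/ops.py | _parse_result_version
-- ===== SOURCE A (Python) =====
-- def _parse_result_version(folder_name: str) -> str | None:
--     if not folder_name.startswith("results-v"):
--         return None
--     version = folder_name.replace("results-", "", 1)
--     if not version.startswith("v"):
--         return None
--     if not all(ch.isdigit() or ch == "." or ch == "v" for ch in version):
--         return None
--     return version
-- ===== SOURCE B (Python) =====
-- import re
--
-- _VERSION_RE = re.compile(r"results-(v[0-9.v]*)")
--
--
-- def _parse_result_version(folder_name: str) -> str | None:
--     m = _VERSION_RE.fullmatch(folder_name)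
--     return m.group(1) if m else None
-- ===== Notes on version B (the rewrite author's own statement) =====
-- stated objective: idiomatic
-- what changed: Replaces the prefix-check + replace + per-character all() scan with a single anchored regular expression re.fullmatch(r'results-(v[0-9.v]*)') whose captured group is returned.
import Mathlib
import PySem

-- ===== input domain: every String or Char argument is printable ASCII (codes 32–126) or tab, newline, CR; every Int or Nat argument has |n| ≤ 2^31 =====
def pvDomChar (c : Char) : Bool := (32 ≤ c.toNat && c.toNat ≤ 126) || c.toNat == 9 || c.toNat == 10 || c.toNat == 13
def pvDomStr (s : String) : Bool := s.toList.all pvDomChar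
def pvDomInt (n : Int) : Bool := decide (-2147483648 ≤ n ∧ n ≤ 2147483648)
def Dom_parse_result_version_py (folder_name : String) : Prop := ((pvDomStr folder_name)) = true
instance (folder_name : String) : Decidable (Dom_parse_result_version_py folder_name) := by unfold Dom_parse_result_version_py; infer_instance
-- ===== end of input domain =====

-- B replaces A's prefix-check + replace + per-character scan with a single anchored
-- regular expression (re.fullmatch) whose captured group is returned (idiomatic).


-- ===== PORT A =====
-- hand port of str.replace(old, new, 1) — replace the FIRST occurrence of old; exact
-- (empty old inserts new in front, as in Python)
def pvReplaceFirst (cs old new : List Char) : List Char :=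
  if old.isPrefixOf cs then new ++ cs.drop old.length
  else match cs with
    | [] => []
    | c :: rest => c :: pvReplaceFirst rest old new

def parse_result_version_py (folder_name : String) : Option String :=
  if ¬ (PySem.Str.startswith folder_name "results-v") then none
  else
    let version := String.ofList (pvReplaceFirst folder_name.toList "results-".toList "".toList)
    if ¬ (PySem.Str.startswith version "v") then none
    else if ¬ (version.toList.all fun ch => PySem.Chars.isdigit ch || ch == '.' || ch == 'v') then none
    else some version

-- ===== PORT B =====
-- hand port of re.fullmatch(r"results-(v[0-9.v]*)", folder_name) (exact): anchored match of
-- the literal "results-", then the captured group: the char 'v' followed by chars of class [0-9.v]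
def pvClass (c : Char) : Bool := ('0' ≤ c && c ≤ '9') || c == '.' || c == 'v'

def parse_result_version_py_alt (folder_name : String) : Option String :=
  let cs := folder_name.toList
  if "results-".toList.isPrefixOf cs then
    match cs.drop 8 with
    | c :: rest => if c == 'v' && rest.all pvClass then some (String.ofList (c :: rest)) else none
    | [] => none
  else none

-- ===== PRECONDITION & SPEC =====
def Spec_parse_result_version_py (folder_name : String) (out : Option String) : Prop := out = parse_result_version_py_alt folder_name
instance (folder_name : String) (out : Option String) : Decidable (Spec_parse_result_version_py folder_name out) := by unfold Spec_parse_result_version_py; infer_instance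

-- ===== CLAIM (what is proved, stated in full; the proofs are below) =====
def Claim_equal_parse_result_version_py : Prop := ∀ (folder_name : String), Dom_parse_result_version_py folder_name → Spec_parse_result_version_py folder_name (parse_result_version_py folder_name)

-- ===== LEMMAS AND PROOFS =====

theorem pvReplaceFirst_of_prefix (cs old new : List Char) (h : old.isPrefixOf cs) :
    pvReplaceFirst cs old new = new ++ cs.drop old.length := by
  rw [pvReplaceFirst.eq_def, if_pos h]

theorem pvClass_eq (c : Char) :
    (PySem.Chars.isdigit c || c == '.' || c == 'v') = pvClass c := by
  simp [PySem.Chars.isdigit, pvClass]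

-- ===== VERDICT (by name: the statement is the Claim_ definition above) =====
theorem parse_result_version_py_spec : Claim_equal_parse_result_version_py := by
  intro s _
  unfold Spec_parse_result_version_py parse_result_version_py parse_result_version_py_alt
  by_cases h : "results-v".toList <+: s.toList
  · obtain ⟨rest, hcs⟩ := h
    have hcs' : s.toList = 'r'::'e'::'s'::'u'::'l'::'t'::'s'::'-'::'v'::rest := by
      rw [← hcs]; rfl
    have hpre : List.isPrefixOf "results-".toList ('r'::'e'::'s'::'u'::'l'::'t'::'s'::'-'::'v'::rest) = true := by
      simp [List.isPrefixOf]
    have hrep : pvReplaceFirst ('r'::'e'::'s'::'u'::'l'::'t'::'s'::'-'::'v'::rest) "results-".toList "".toList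
        = 'v' :: rest := by
      rw [pvReplaceFirst_of_prefix _ _ _ hpre]; rfl
    have hsw : PySem.Str.startswith s "results-v" = true := by
      simp only [PySem.Str.startswith_eq, PySem.Chars.startswith_iff, hcs']
      exact ⟨rest, rfl⟩
    simp only [hcs', hrep, hsw, hpre, if_true, List.drop_succ_cons, List.drop_zero,
      String.toList_ofList]
    have h1 : PySem.Str.startswith (String.ofList ('v' :: rest)) "v" = true := by
      simp only [PySem.Str.startswith_eq, PySem.Chars.startswith_iff, String.toList_ofList]
      exact ⟨rest, rfl⟩
    have hv : pvClass 'v' = true := by decide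
    simp only [h1, List.all_cons, pvClass_eq, hv, Bool.true_and, beq_self_eq_true]
    cases hall : rest.all pvClass
    · simp
    · simp
  · have hsw : PySem.Str.startswith s "results-v" = false := by
      simp only [PySem.Str.startswith_eq]
      rw [Bool.eq_false_iff]
      intro hc
      exact h ((PySem.Chars.startswith_iff _ _).mp hc)
    simp only [hsw, Bool.false_eq_true, not_false_eq_true, if_true]
    by_cases hp : List.isPrefixOf "results-".toList s.toList
    · obtain ⟨t, ht⟩ := List.isPrefixOf_iff_prefix.mp hp
      have hdrop : s.toList.drop 8 = t := by rw [← ht]; rfl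
      simp only [hp, if_true, hdrop]
      cases t with
      | nil => rfl
      | cons c r =>
        by_cases hc : c = 'v'
        · exact absurd ⟨r, by rw [← ht, hc]; rfl⟩ h
        · simp [hc]
    · rw [if_neg (by simpa using hp)]
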